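-- pv_equiv track=rewrite | github.com/qrzhang/Codility | Codility/solution2.py | solution
-- ===== SOURCE A (Python) =====
-- def solution(A):
--     """
--     :param A: an array contains integers
--     :return: return the abs value of max paired integers
--     """
--     dicA = {}
--     maxPair = 0
--     for item in A:
--         if abs(item) in dicA.keys():
--             if item == -dicA[abs(item)] and abs(item) > maxPair:
--                 maxPair = abs(item)
--         else:
--             dicA[abs(item)] = item
--     return maxPair
-- ===== SOURCE B (Python) =====
-- def solution(A):
--     pos = {v for v in A if v > 0}
--     neg = {-v for v in A if v < 0}
--     return max(pos & neg, default=0)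
-- ===== Notes on version B (the rewrite author's own statement) =====
-- stated objective: simpler
-- what changed: Replaces A's single pass with a lazily-populated first-seen dict and inline opposite-sign detection by two sign-filtered abs-value set comprehensions, a set intersection and max(..., default=0).
import Mathlib
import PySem

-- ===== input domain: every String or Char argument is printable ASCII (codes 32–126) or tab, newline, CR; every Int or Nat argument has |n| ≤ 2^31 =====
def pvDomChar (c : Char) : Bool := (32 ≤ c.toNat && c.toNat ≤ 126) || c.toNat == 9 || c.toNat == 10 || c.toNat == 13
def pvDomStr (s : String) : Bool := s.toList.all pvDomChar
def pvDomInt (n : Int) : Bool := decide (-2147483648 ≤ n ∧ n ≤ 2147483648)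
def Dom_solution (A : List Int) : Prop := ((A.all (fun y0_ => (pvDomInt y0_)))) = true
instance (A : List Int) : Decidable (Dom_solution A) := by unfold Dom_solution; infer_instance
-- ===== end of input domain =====

-- B replaces A's single pass (first-seen dict keyed by abs value, inline opposite-sign detection)
-- by two sign-filtered abs-value sets, their intersection and max(..., default=0): simpler.


-- ===== PORT A =====
def solution (A : List Int) : Int :=
  (A.foldl
    (fun (st : PySem.Dict Int Int × Int) item =>
      match st.1.get? |item| with
      | some v =>                                    -- "abs(item) in dicA.keys()"
        if item = -v ∧ |item| > st.2 then (st.1, |item|) else st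
      | none => (st.1.insert |item| item, st.2))
    (PySem.Dict.empty, 0)).2

-- ===== PORT B =====
def solution_alt (A : List Int) : Int :=
  let pos : PySem.Set Int := PySem.Set.ofList (A.filter (fun v => decide (0 < v)))
  let neg : PySem.Set Int := PySem.Set.ofList ((A.filter (fun v => decide (v < 0))).map (fun v => -v))
  PySem.List.maxD (PySem.Set.inter pos neg) (fun x => x) 0

-- ===== PRECONDITION & SPEC =====
def Spec_solution (A : List Int) (out : Int) : Prop := out = solution_alt A
instance (A : List Int) (out : Int) : Decidable (Spec_solution A out) := by unfold Spec_solution; infer_instance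

-- ===== CLAIM (what is proved, stated in full; the proofs are below) =====
def Claim_equal_solution : Prop := ∀ (A : List Int), Dom_solution A → Spec_solution A (solution A)

-- ===== LEMMAS AND PROOFS =====

-- a is a "paired" value of P: positive with both signs present
def Paired (P : List Int) (a : Int) : Prop := 0 < a ∧ a ∈ P ∧ -a ∈ P

-- m is the answer for P: the maximum paired value, 0 if none
def Good (P : List Int) (m : Int) : Prop :=
  0 ≤ m ∧ (m = 0 ∨ Paired P m) ∧ ∀ a, Paired P a → a ≤ m

-- invariant of A's dict w.r.t. the processed prefix P
def DInv (d : PySem.Dict Int Int) (P : List Int) : Prop :=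
  (∀ a v, d.get? a = some v → |v| = a ∧ v ∈ P) ∧
  (∀ x ∈ P, (d.get? |x|).isSome = true)

-- A's loop body, named for the proofs (definitionally the fold function of `solution`)
def stepA (st : PySem.Dict Int Int × Int) (item : Int) : PySem.Dict Int Int × Int :=
  match st.1.get? |item| with
  | some v => if item = -v ∧ |item| > st.2 then (st.1, |item|) else st
  | none => (st.1.insert |item| item, st.2)

lemma good_unique {P : List Int} {m₁ m₂ : Int} (h₁ : Good P m₁) (h₂ : Good P m₂) : m₁ = m₂ := by
  obtain ⟨n₁, w₁, u₁⟩ := h₁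
  obtain ⟨n₂, w₂, u₂⟩ := h₂
  rcases w₁ with h | h
  · rcases w₂ with h' | h'
    · omega
    · have := u₁ _ h'; have := h'.1; omega
  · rcases w₂ with h' | h'
    · have := u₂ _ h; have := h.1; omega
    · have := u₁ _ h'; have := u₂ _ h; omega

lemma step_preserves {d : PySem.Dict Int Int} {m : Int} {P : List Int} (x : Int)
    (hI : DInv d P) (hG : Good P m) :
    DInv (stepA (d, m) x).1 (P ++ [x]) ∧ Good (P ++ [x]) (stepA (d, m) x).2 := by
  obtain ⟨hm0, hw, hub⟩ := hG
  cases h : d.get? |x| with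
  | none =>
    have hxP : x ∉ P := by
      intro hx
      have hs := hI.2 x hx; rw [h] at hs; simp at hs
    have hnxP : -x ∉ P := by
      intro hx
      have hs := hI.2 (-x) hx; rw [abs_neg, h] at hs; simp at hs
    have hstep : stepA (d, m) x = (d.insert |x| x, m) := by
      simp only [stepA, h]
    rw [hstep]
    refine ⟨⟨?_, ?_⟩, hm0, ?_, ?_⟩
    · intro a v hv
      rw [PySem.Dict.get?_insert] at hv
      split_ifs at hv with hax
      · cases hv; subst hax; exact ⟨rfl, by simp⟩
      · obtain ⟨h1, h2⟩ := hI.1 a v hv; exact ⟨h1, by simp [h2]⟩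
    · intro y hy
      rw [PySem.Dict.get?_insert]
      rcases List.mem_append.1 hy with hy | hy
      · split_ifs with hax
        · rfl
        · exact hI.2 y hy
      · rw [List.mem_singleton.1 hy]; simp
    · rcases hw with h0 | hp
      · exact Or.inl h0
      · exact Or.inr ⟨hp.1, List.mem_append_left _ hp.2.1, List.mem_append_left _ hp.2.2⟩
    · rintro a ⟨ha0, haP, hnaP⟩
      rcases List.mem_append.1 haP with haP | haP <;>
        rcases List.mem_append.1 hnaP with hnaP | hnaP
      · exact hub a ⟨ha0, haP, hnaP⟩
      · have : a = -x := by have := List.mem_singleton.1 hnaP; omega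
        exact absurd haP (this ▸ hnxP)
      · rw [List.mem_singleton.1 haP] at hnaP
        exact absurd hnaP hnxP
      · have h1 := List.mem_singleton.1 haP
        have h2 := List.mem_singleton.1 hnaP
        omega
  | some v =>
    obtain ⟨hva, hvP⟩ := hI.1 _ _ h
    have hvx : v = x ∨ v = -x := abs_eq_abs.1 hva
    have hI' : DInv d (P ++ [x]) := by
      refine ⟨fun a w hw => ⟨(hI.1 a w hw).1, List.mem_append_left _ (hI.1 a w hw).2⟩,
        fun y hy => ?_⟩
      rcases List.mem_append.1 hy with hy | hy
      · exact hI.2 y hy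
      · rw [List.mem_singleton.1 hy, h]; rfl
    by_cases hc : x = -v ∧ |x| > m
    · have hstep : stepA (d, m) x = (d, |x|) := by
        simp only [stepA, h]; rw [if_pos hc]
      rw [hstep]
      have hx0 : x ≠ 0 := by
        rintro rfl; simp at hc; omega
      have hvnx : v = -x := by obtain ⟨h1, _⟩ := hc; omega
      refine ⟨hI', abs_nonneg x, Or.inr ⟨abs_pos.2 hx0, ?_, ?_⟩, ?_⟩
      · by_cases hxpos : 0 < x
        · rw [abs_of_pos hxpos]
          exact List.mem_append_right _ (List.mem_singleton.2 rfl)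
        · rw [abs_of_neg (by omega)]
          exact List.mem_append_left _ (by rw [← hvnx]; exact hvP)
      · by_cases hxpos : 0 < x
        · rw [abs_of_pos hxpos]
          exact List.mem_append_left _ (by rw [← hvnx]; exact hvP)
        · rw [abs_of_neg (by omega), neg_neg]
          exact List.mem_append_right _ (List.mem_singleton.2 rfl)
      · rintro a ⟨ha0, haP, hnaP⟩
        rcases List.mem_append.1 haP with haP | haP <;>
          rcases List.mem_append.1 hnaP with hnaP | hnaP
        · have := hub a ⟨ha0, haP, hnaP⟩; omega
        · have h2 := List.mem_singleton.1 hnaP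
          rw [abs_of_neg (show x < 0 by omega)]; omega
        · have h2 := List.mem_singleton.1 haP
          rw [abs_of_pos (show 0 < x by omega)]; omega
        · have := List.mem_singleton.1 haP; have := List.mem_singleton.1 hnaP; omega
    · have hstep : stepA (d, m) x = (d, m) := by
        simp only [stepA, h]; rw [if_neg hc]
      rw [hstep]
      refine ⟨hI', hm0, ?_, ?_⟩
      · rcases hw with h0 | hp
        · exact Or.inl h0
        · exact Or.inr ⟨hp.1, List.mem_append_left _ hp.2.1, List.mem_append_left _ hp.2.2⟩
      · rintro a ⟨ha0, haP, hnaP⟩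
        rcases List.mem_append.1 haP with haP | haP <;>
          rcases List.mem_append.1 hnaP with hnaP | hnaP
        · exact hub a ⟨ha0, haP, hnaP⟩
        · -- a ∈ P, -a = x (so x < 0, |x| = a)
          have hax : x = -a := by have := List.mem_singleton.1 hnaP; omega
          rcases hvx with h1 | h1
          · -- v = x = -a ∈ P : pair already in P
            exact hub a ⟨ha0, haP, by rw [show -a = v by omega]; exact hvP⟩
          · -- v = -x = a : Python's trigger fired, so ¬(|x| > m)
            have hle : ¬ (|x| > m) := fun hgt => hc ⟨by omega, hgt⟩
            have : |x| = a := by rw [hax, abs_of_nonpos (by omega), neg_neg]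
            omega
        · -- -a ∈ P, a = x (so x > 0, |x| = a)
          have hax : a = x := List.mem_singleton.1 haP
          rcases hvx with h1 | h1
          · -- v = x = a ∈ P : pair already in P
            exact hub a ⟨ha0, by rw [show a = v by omega]; exact hvP, hnaP⟩
          · -- v = -x : trigger fired, so ¬(|x| > m)
            have hle : ¬ (|x| > m) := fun hgt => hc ⟨by omega, hgt⟩
            have : |x| = a := by rw [abs_of_pos (show 0 < x by omega)]; omega
            omega
        · have := List.mem_singleton.1 haP; have := List.mem_singleton.1 hnaP; omega

lemma fold_good : ∀ (R P : List Int) (d : PySem.Dict Int Int) (m : Int),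
    DInv d P → Good P m → Good (P ++ R) (R.foldl stepA (d, m)).2 := by
  intro R
  induction R with
  | nil => intro P d m _ hG; simpa using hG
  | cons x R ih =>
    intro P d m hI hG
    obtain ⟨hI', hG'⟩ := step_preserves x hI hG
    have := ih (P ++ [x]) (stepA (d, m) x).1 (stepA (d, m) x).2 hI' hG'
    simpa [List.foldl_cons] using this

lemma solution_good (A : List Int) : Good A (solution A) := by
  have hI : DInv PySem.Dict.empty [] := by
    constructor
    · intro a v hv; simp [PySem.Dict.get?_empty] at hv
    · intro x hx; simp at hx
  have hG : Good [] (0 : Int) := ⟨le_refl 0, Or.inl rfl, fun a ⟨_, ha, _⟩ => by simp at ha⟩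
  have := fold_good A [] PySem.Dict.empty 0 hI hG
  simpa [solution, stepA] using this

lemma mem_inter_iff_paired (A : List Int) (a : Int) :
    a ∈ PySem.Set.inter (PySem.Set.ofList (A.filter (fun v => decide (0 < v))))
        (PySem.Set.ofList ((A.filter (fun v => decide (v < 0))).map (fun v => -v))) ↔ Paired A a := by
  rw [PySem.Set.mem_inter, PySem.Set.mem_ofList, PySem.Set.mem_ofList, List.mem_filter, List.mem_map]
  constructor
  · rintro ⟨⟨haA, ha0⟩, b, hb, rfl⟩
    rw [List.mem_filter] at hb
    exact ⟨by simpa using ha0, haA, by simpa using hb.1⟩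
  · rintro ⟨ha0, haA, hnaA⟩
    exact ⟨⟨haA, by simpa using ha0⟩, -a, List.mem_filter.2 ⟨hnaA, by simp; omega⟩, by ring⟩

lemma alt_good (A : List Int) : Good A (solution_alt A) := by
  have hs : solution_alt A = (PySem.List.max?
      (PySem.Set.inter (PySem.Set.ofList (A.filter (fun v => decide (0 < v))))
        (PySem.Set.ofList ((A.filter (fun v => decide (v < 0))).map (fun v => -v))))
      (fun x => x)).getD 0 := rfl
  rw [hs]
  cases h : PySem.List.max?
      (PySem.Set.inter (PySem.Set.ofList (A.filter (fun v => decide (0 < v))))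
        (PySem.Set.ofList ((A.filter (fun v => decide (v < 0))).map (fun v => -v)))) (fun x => x) with
  | none =>
    rw [PySem.List.max?_eq_none_iff] at h
    exact ⟨le_refl 0, Or.inl rfl, fun a hp => absurd ((mem_inter_iff_paired A a).2 hp) (by simp [h])⟩
  | some mx =>
    have hmem := (mem_inter_iff_paired A mx).1 (PySem.List.max?_mem h)
    refine ⟨le_of_lt hmem.1, Or.inr hmem, fun a hp => ?_⟩
    exact PySem.List.max?_isMax h a ((mem_inter_iff_paired A a).2 hp)

-- ===== VERDICT (by name: the statement is the Claim_ definition above) =====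
theorem solution_spec : Claim_equal_solution := by
  intro A _
  exact good_unique (solution_good A) (alt_good A)
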